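-- pv_equiv track=rewrite | github.com/mutjin08/baekjoon | Dynamic Programming 2/20002_사과나무.py | solution
-- ===== SOURCE A (Python) =====
-- def solution(n, benefits):
--   answer = []
--   dp = [[0 for _ in range(n+1)] for _ in range(n+1)]
--   for x in range(1, n+1):
--     for y in range(1, n+1):
--       dp[x][y] = benefits[x-1][y-1] + dp[x-1][y] + dp[x][y-1] - dp[x-1][y-1]
--
--   for k in range(0, n):
--     for x1 in range(0, n-k):
--       for y1 in range(0, n-k):
--         x2, y2 = x1+k, y1+k
--         answer.append(dp[x2+1][y2+1] - dp[x1][y2+1] - dp[x2+1][y1] + dp[x1][y1])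
--
--   return max(answer)
-- ===== SOURCE B (Python) =====
-- def _slide_row(n, colsum, k, r, best):
--     # max over all width-(k+1) windows of the row band [r, r+k], via an O(1) sliding update
--     top, bot = colsum[r], colsum[r + k + 1]
--     strip = [bot[j] - top[j] for j in range(n)]
--     total = sum(strip[:k + 1])
--     best = total if best is None else max(best, total)
--     for c in range(1, n - k):
--         total += strip[c + k] - strip[c - 1]
--         best = total if best is None else max(best, total)
--     return best
--
-- def solution(n, benefits):
--     # column prefix sums: colsum[i][j] = sum of benefits[0..i-1][j]
--     cols = [0] * n
--     colsum = [cols]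
--     for row in benefits[:n]:
--         cols = [cols[j] + row[j] for j in range(n)]
--         colsum.append(cols)
--     best = None
--     for k in range(n):
--         for r in range(n - k):
--             best = _slide_row(n, colsum, k, r, best)
--     return best
-- ===== Notes on version B (the rewrite author's own statement) =====
-- stated objective: alternative
-- what changed: Replaces the 2D inclusion-exclusion prefix-sum table plus a materialised list of all square sums with 1D column prefix sums and a horizontal sliding window (O(1) update per square) over a running maximum.
import Mathlib
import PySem

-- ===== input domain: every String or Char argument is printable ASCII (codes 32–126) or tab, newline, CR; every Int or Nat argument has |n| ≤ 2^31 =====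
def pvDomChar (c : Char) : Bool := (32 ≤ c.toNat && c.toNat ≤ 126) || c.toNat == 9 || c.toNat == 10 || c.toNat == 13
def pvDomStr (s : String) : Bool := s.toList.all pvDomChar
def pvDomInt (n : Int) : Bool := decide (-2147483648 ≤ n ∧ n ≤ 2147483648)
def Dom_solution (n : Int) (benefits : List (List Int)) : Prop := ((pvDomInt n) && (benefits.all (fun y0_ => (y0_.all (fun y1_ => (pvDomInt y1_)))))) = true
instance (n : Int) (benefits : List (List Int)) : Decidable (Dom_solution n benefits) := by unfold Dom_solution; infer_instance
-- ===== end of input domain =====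

-- B replaces A's 2D inclusion-exclusion prefix table and materialised candidate list by
-- 1D column prefix sums with an O(1) horizontal sliding window over a running maximum
-- (objective: alternative; equivalence of the RETURN value on Pre_).

-- ===== PORT A =====
def solution (n : Int) (benefits : List (List Int)) : Int :=
  let bget : Int → Int → Int := fun x y =>
    PySem.List.pyGetD (PySem.List.pyGetD benefits x ([] : List Int)) y 0
  let dp : Int → Int → Int :=
    (PySem.List.pyRange 1 (n+1) 1).foldl (fun dp x =>
      (PySem.List.pyRange 1 (n+1) 1).foldl (fun dp y =>
        fun a b =>
          if a = x ∧ b = y then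
            bget (x-1) (y-1) + dp (x-1) y + dp x (y-1) - dp (x-1) (y-1)
          else dp a b) dp) (fun _ _ => (0 : Int))
  let answer : List Int :=
    (PySem.List.pyRange 0 n 1).foldl (fun ans k =>
      (PySem.List.pyRange 0 (n-k) 1).foldl (fun ans x1 =>
        (PySem.List.pyRange 0 (n-k) 1).foldl (fun ans y1 =>
          ans ++ [dp (x1+k+1) (y1+k+1) - dp x1 (y1+k+1) - dp (x1+k+1) y1 + dp x1 y1]) ans) ans) []
  (PySem.List.max? answer (fun v => v)).getD 0

-- ===== PORT B =====
-- B-side helpers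
def colsumStep (n : Int) : (List Int × List (List Int)) → List Int → (List Int × List (List Int)) :=
  fun st row =>
    let cols := (PySem.List.pyRange 0 n 1).map (fun j =>
      PySem.List.pyGetD st.1 j 0 + PySem.List.pyGetD row j 0)
    (cols, st.2 ++ [cols])

def slideRow (n : Int) (colsum : List (List Int)) (k r : Int) (best : Option Int) : Option Int :=
  let top := PySem.List.pyGetD colsum r ([] : List Int)
  let bot := PySem.List.pyGetD colsum (r + k + 1) ([] : List Int)
  let strip := (PySem.List.pyRange 0 n 1).map (fun j =>
    PySem.List.pyGetD bot j 0 - PySem.List.pyGetD top j 0)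
  let total := (PySem.List.slice strip none (some (k+1))).sum
  let best' := some (match best with | none => total | some b => max b total)
  ((PySem.List.pyRange 1 (n-k) 1).foldl (fun (st : Int × Option Int) c =>
    let t := st.1 + (PySem.List.pyGetD strip (c+k) 0 - PySem.List.pyGetD strip (c-1) 0)
    (t, some (match st.2 with | none => t | some b => max b t))) (total, best')).2

def solution_alt (n : Int) (benefits : List (List Int)) : Int :=
  let colsum := ((PySem.List.slice benefits none (some n)).foldl (colsumStep n)
    (List.replicate n.toNat 0, [List.replicate n.toNat 0])).2
  let best : Option Int :=
    (PySem.List.pyRange 0 n 1).foldl (fun best k =>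
      (PySem.List.pyRange 0 (n-k) 1).foldl (fun best r =>
        slideRow n colsum k r best) best) none
  best.getD 0

-- ===== PRECONDITION & SPEC =====
-- Pre_ excludes exactly the inputs on which A raises: n ≤ 0 (max of an empty list,
-- ValueError) and tables with fewer than n rows or a row among the first n shorter
-- than n (IndexError).
def Pre_solution (n : Int) (benefits : List (List Int)) : Prop :=
  1 ≤ n ∧ n ≤ (benefits.length : Int) ∧
    ∀ row ∈ benefits.take n.toNat, n ≤ (row.length : Int)
instance (n : Int) (benefits : List (List Int)) : Decidable (Pre_solution n benefits) := by
  unfold Pre_solution; infer_instance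
def pvWitness_solution : Int × List (List Int) := (2, [[1, -2], [3, 4]])

def Spec_solution (n : Int) (benefits : List (List Int)) (out : Int) : Prop := out = solution_alt n benefits
instance (n : Int) (benefits : List (List Int)) (out : Int) : Decidable (Spec_solution n benefits out) := by unfold Spec_solution; infer_instance

-- ===== CLAIM (what is proved, stated in full; the proofs are below) =====
def Claim_equal_solution : Prop := ∀ (n : Int) (benefits : List (List Int)), Dom_solution n benefits → Pre_solution n benefits → Spec_solution n benefits (solution n benefits)

-- ===== LEMMAS AND PROOFS =====

-- mathematical value layer -------------------------------------------------
def bN (benefits : List (List Int)) (i j : Nat) : Int := (benefits.getD i []).getD j 0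

def Pf (benefits : List (List Int)) (x y : Nat) : Int :=
  ∑ i ∈ Finset.range x, ∑ j ∈ Finset.range y, bN benefits i j

def Cc (benefits : List (List Int)) (i j : Nat) : Int :=
  ∑ t ∈ Finset.range i, bN benefits t j

def qv (benefits : List (List Int)) (k x1 y1 : Nat) : Int :=
  Pf benefits (x1+k+1) (y1+k+1) - Pf benefits x1 (y1+k+1)
    - Pf benefits (x1+k+1) y1 + Pf benefits x1 y1

def vals (n : Int) (benefits : List (List Int)) : List Int :=
  (PySem.List.pyRange 0 n 1).flatMap (fun k =>
    (PySem.List.pyRange 0 (n-k) 1).flatMap (fun x1 =>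
      (PySem.List.pyRange 0 (n-k) 1).map (fun y1 =>
        qv benefits k.toNat x1.toNat y1.toNat)))

def mstep : Option Int → Int → Option Int := fun o t =>
  some (match o with | none => t | some b => max b t)

def stripvD (benefits : List (List Int)) (rN kN jN : Nat) : Int :=
  Cc benefits (rN+kN+1) jN - Cc benefits rN jN

def Wv (benefits : List (List Int)) (rN kN y1 : Nat) : Int :=
  ∑ j ∈ Finset.range (kN+1), stripvD benefits rN kN (y1+j)

def colRow (benefits : List (List Int)) (n : Int) (i : Nat) : List Int :=
  (PySem.List.pyRange 0 n 1).map (fun j => Cc benefits i j.toNat)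

-- generic list lemmas -------------------------------------------------------
theorem flatMap_singleton_eq_map {α β : Type} (f : α → β) (l : List α) :
    l.flatMap (fun x => [f x]) = l.map f := by
  induction l with
  | nil => rfl
  | cons x t ih => simp [List.flatMap_cons, ih]

theorem sum_map_range (f : Nat → Int) (n : Nat) :
    ((List.range n).map f).sum = ∑ i ∈ Finset.range n, f i := by
  induction n with
  | zero => simp
  | succ m ih => simp [List.range_succ, Finset.sum_range_succ, ih]

theorem foldl_mstep_some (l : List Int) : ∀ a : Int, l.foldl mstep (some a) = some (l.foldl max a) := by
  induction l with
  | nil => intro a; rfl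
  | cons x t ih => intro a; simpa [mstep] using ih (max a x)

theorem foldl_mstep_max? (l : List Int) :
    l.foldl mstep none = PySem.List.max? l (fun v => v) := by
  cases l with
  | nil => rfl
  | cons x t =>
    rw [PySem.List.max?_id_cons]
    show List.foldl mstep (mstep none x) t = _
    simpa [mstep] using foldl_mstep_some t x

theorem foldl_via {α β γ : Type} (l : List α) (body : γ → α → γ) (comb : γ → β → γ)
    (g : α → List β)
    (h : ∀ acc, ∀ x ∈ l, body acc x = (g x).foldl comb acc) :
    ∀ init, l.foldl body init = (l.flatMap g).foldl comb init := by
  induction l with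
  | nil => intro init; rfl
  | cons x t ih =>
    intro init
    rw [List.foldl_cons, List.flatMap_cons, List.foldl_append,
        h init x (List.mem_cons_self), ih (fun acc y hy => h acc y (List.mem_cons_of_mem x hy))]

-- prefix-sum algebra --------------------------------------------------------
theorem Pf_zero_right (benefits : List (List Int)) (x : Nat) : Pf benefits x 0 = 0 := by
  simp [Pf]

theorem Pf_zero_left (benefits : List (List Int)) (y : Nat) : Pf benefits 0 y = 0 := by
  simp [Pf]

theorem Pf_succ_left (benefits : List (List Int)) (x y : Nat) :
    Pf benefits (x+1) y = Pf benefits x y + ∑ j ∈ Finset.range y, bN benefits x j :=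
  Finset.sum_range_succ _ x

theorem Pf_rec (benefits : List (List Int)) (x y : Nat) :
    Pf benefits (x+1) (y+1) =
      bN benefits x y + Pf benefits x (y+1) + Pf benefits (x+1) y - Pf benefits x y := by
  rw [Pf_succ_left, Pf_succ_left, Finset.sum_range_succ]
  ring

theorem Pf_eq_sum_Cc (benefits : List (List Int)) (x y : Nat) :
    Pf benefits x y = ∑ j ∈ Finset.range y, Cc benefits x j := by
  unfold Pf Cc
  exact Finset.sum_comm

theorem window_sub (benefits : List (List Int)) (x y1 kN : Nat) :
    ∑ j ∈ Finset.range (kN+1), Cc benefits x (y1+j)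
      = ∑ j ∈ Finset.range (y1+kN+1), Cc benefits x j - ∑ j ∈ Finset.range y1, Cc benefits x j := by
  have h := Finset.sum_Ico_eq_sub (fun j => Cc benefits x j) (show y1 ≤ y1+kN+1 by omega)
  rw [Finset.sum_Ico_eq_sum_range] at h
  have e : y1 + kN + 1 - y1 = kN + 1 := by omega
  rw [e] at h
  exact h

theorem Wv_eq_qv (benefits : List (List Int)) (rN kN y1 : Nat) :
    Wv benefits rN kN y1 = qv benefits kN rN y1 := by
  unfold Wv stripvD qv
  rw [Finset.sum_sub_distrib, window_sub, window_sub,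
      Pf_eq_sum_Cc, Pf_eq_sum_Cc, Pf_eq_sum_Cc, Pf_eq_sum_Cc]
  ring

theorem Wv_succ (benefits : List (List Int)) (rN kN y1 : Nat) :
    Wv benefits rN kN (y1+1)
      = Wv benefits rN kN y1 + stripvD benefits rN kN (y1+1+kN) - stripvD benefits rN kN y1 := by
  have e1 : ∑ j ∈ Finset.range (kN+1+1), stripvD benefits rN kN (y1+j)
      = Wv benefits rN kN y1 + stripvD benefits rN kN (y1+(kN+1)) := by
    rw [Finset.sum_range_succ]; rfl
  have e2 : ∑ j ∈ Finset.range (kN+1+1), stripvD benefits rN kN (y1+j)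
      = (∑ j ∈ Finset.range (kN+1), stripvD benefits rN kN (y1+(j+1)))
          + stripvD benefits rN kN (y1+0) := by
    rw [Finset.sum_range_succ']
  have e3 : (∑ j ∈ Finset.range (kN+1), stripvD benefits rN kN (y1+(j+1)))
      = Wv benefits rN kN (y1+1) := by
    unfold Wv
    exact Finset.sum_congr rfl (fun j _ => by congr 1; omega)
  rw [e3] at e2
  rw [show y1+(kN+1) = y1+1+kN by omega] at e1
  rw [show y1+0 = y1 by omega] at e2
  omega

-- the entry bget ------------------------------------------------------------
theorem bget_eq (n : Int) (benefits : List (List Int))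
    (hlen : n ≤ (benefits.length : Int))
    (hrows : ∀ row ∈ benefits.take n.toNat, n ≤ (row.length : Int))
    (x y : Int) (hx0 : 0 ≤ x) (hxn : x < n) (hy0 : 0 ≤ y) (hyn : y < n) :
    PySem.List.pyGetD (PySem.List.pyGetD benefits x ([] : List Int)) y 0
      = bN benefits x.toNat y.toNat := by
  have hxl : x < (benefits.length : Int) := lt_of_lt_of_le hxn hlen
  rw [PySem.List.pyGetD_eq_getElem benefits ([] : List Int) hx0 hxl]
  have hxN : x.toNat < benefits.length := by omega
  have hmem : benefits[x.toNat] ∈ benefits.take n.toNat := by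
    have hlt : x.toNat < (benefits.take n.toNat).length := by
      simp only [List.length_take]
      omega
    have hg : (benefits.take n.toNat)[x.toNat] = benefits[x.toNat] := List.getElem_take
    rw [← hg]
    exact List.getElem_mem hlt
  have hrl := hrows _ hmem
  have hyl : y < (benefits[x.toNat].length : Int) := lt_of_lt_of_le hyn hrl
  rw [PySem.List.pyGetD_eq_getElem _ 0 hy0 hyl]
  unfold bN
  rw [List.getD_eq_getElem benefits ([] : List Int) hxN,
      List.getD_eq_getElem _ 0 (show y.toNat < benefits[x.toNat].length by omega)]


-- A-side: the dp table is the 2D prefix sum -----------------------------------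
theorem dp_inner (n : Int) (benefits : List (List Int))
    (hlen : n ≤ (benefits.length : Int))
    (hrows : ∀ row ∈ benefits.take n.toNat, n ≤ (row.length : Int))
    (x : Int) (hx1 : 1 ≤ x) (hxn : x ≤ n) :
    ∀ (fuel : Nat) (y0 : Int) (dp : Int → Int → Int), 1 ≤ y0 → y0 + (fuel : Int) = n + 1 →
    (∀ a b, 0 ≤ a → a ≤ x → 0 ≤ b → b ≤ n → (a < x ∨ b < y0) →
      dp a b = Pf benefits a.toNat b.toNat) →
    ∀ a b,
      ((PySem.List.pyRange y0 (n+1) 1).foldl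
        (fun dp y => fun a b =>
          if a = x ∧ b = y then
            PySem.List.pyGetD (PySem.List.pyGetD benefits (x-1) ([] : List Int)) (y-1) 0
              + dp (x-1) y + dp x (y-1) - dp (x-1) (y-1)
          else dp a b) dp) a b
      = if a = x ∧ y0 ≤ b ∧ b ≤ n then Pf benefits a.toNat b.toNat else dp a b := by
  intro fuel
  induction fuel with
  | zero =>
    intro y0 dp hy0 hfuel H a b
    rw [PySem.List.pyRange_one_eq_nil (show n+1 ≤ y0 by omega)]
    simp only [List.foldl_nil]
    rw [if_neg (show ¬ (a = x ∧ y0 ≤ b ∧ b ≤ n) by omega)]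
  | succ fuel ih =>
    intro y0 dp hy0 hfuel H a b
    have hlt : y0 < n + 1 := by omega
    rw [PySem.List.pyRange_one_cons hlt, List.foldl_cons]
    set dp1 : Int → Int → Int := fun a b =>
      if a = x ∧ b = y0 then
        PySem.List.pyGetD (PySem.List.pyGetD benefits (x-1) ([] : List Int)) (y0-1) 0
          + dp (x-1) y0 + dp x (y0-1) - dp (x-1) (y0-1)
      else dp a b with hdp1
    have hv : dp1 x y0 = Pf benefits x.toNat y0.toNat := by
      rw [hdp1]
      simp only [and_self, if_pos]
      rw [bget_eq n benefits hlen hrows (x-1) (y0-1) (by omega) (by omega) (by omega) (by omega),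
          H (x-1) y0 (by omega) (by omega) (by omega) (by omega) (by omega),
          H x (y0-1) (by omega) (by omega) (by omega) (by omega) (by omega),
          H (x-1) (y0-1) (by omega) (by omega) (by omega) (by omega) (by omega)]
      have ex : x.toNat = (x-1).toNat + 1 := by omega
      have ey : y0.toNat = (y0-1).toNat + 1 := by omega
      rw [ex, ey, Pf_rec]
    have H1 : ∀ a b, 0 ≤ a → a ≤ x → 0 ≤ b → b ≤ n → (a < x ∨ b < y0 + 1) →
        dp1 a b = Pf benefits a.toNat b.toNat := by
      intro a b ha0 hax hb0 hbn hcase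
      by_cases hc : a = x ∧ b = y0
      · rw [hc.1, hc.2]; exact hv
      · rw [hdp1]
        simp only [hc, if_false]
        apply H a b ha0 hax hb0 hbn
        rcases hcase with h | h
        · exact Or.inl h
        · by_cases hax' : a = x
          · right
            rcases lt_or_eq_of_le (by omega : b ≤ y0) with h' | h'
            · exact h'
            · exact absurd ⟨hax', h'⟩ hc
          · exact Or.inl (by omega)
    have := ih (y0+1) dp1 (by omega) (by omega) H1 a b
    rw [this]
    by_cases hax : a = x
    · subst hax
      by_cases hb : y0 ≤ b ∧ b ≤ n
      · rcases lt_or_eq_of_le hb.1 with h' | h'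
        · rw [if_pos ⟨rfl, by omega, hb.2⟩, if_pos ⟨rfl, hb⟩]
        · subst h'
          rw [if_neg (by omega), if_pos ⟨rfl, hb⟩]
          exact hv
      · rw [if_neg (by intro hcon; exact hb ⟨by omega, hcon.2.2⟩),
            if_neg (by intro hcon; exact hb ⟨hcon.2.1, hcon.2.2⟩)]
        rw [hdp1]
        simp only
        rw [if_neg (by intro hcon; exact hb ⟨le_of_eq hcon.2.symm, by omega⟩)]
    · rw [if_neg (by intro hcon; exact hax hcon.1), if_neg (by intro hcon; exact hax hcon.1),
          hdp1]
      simp only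
      rw [if_neg (by intro hcon; exact hax hcon.1)]

theorem dp_outer (n : Int) (benefits : List (List Int))
    (hlen : n ≤ (benefits.length : Int))
    (hrows : ∀ row ∈ benefits.take n.toNat, n ≤ (row.length : Int)) :
    ∀ (fuel : Nat) (x0 : Int) (dp : Int → Int → Int), 1 ≤ x0 → x0 + (fuel : Int) = n + 1 →
    (∀ a b, 0 ≤ a → a < x0 → 0 ≤ b → b ≤ n → dp a b = Pf benefits a.toNat b.toNat) →
    (∀ a b, x0 ≤ a → dp a b = 0) →
    ∀ a b, 0 ≤ a → a ≤ n → 0 ≤ b → b ≤ n →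
      ((PySem.List.pyRange x0 (n+1) 1).foldl
        (fun dp x => (PySem.List.pyRange 1 (n+1) 1).foldl
          (fun dp y => fun a b =>
            if a = x ∧ b = y then
              PySem.List.pyGetD (PySem.List.pyGetD benefits (x-1) ([] : List Int)) (y-1) 0
                + dp (x-1) y + dp x (y-1) - dp (x-1) (y-1)
            else dp a b) dp) dp) a b
      = Pf benefits a.toNat b.toNat := by
  intro fuel
  induction fuel with
  | zero =>
    intro x0 dp hx0 hfuel H1 H2 a b ha0 han hb0 hbn
    rw [PySem.List.pyRange_one_eq_nil (show n+1 ≤ x0 by omega)]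
    simp only [List.foldl_nil]
    exact H1 a b ha0 (by omega) hb0 hbn
  | succ fuel ih =>
    intro x0 dp hx0 hfuel H1 H2 a b ha0 han hb0 hbn
    have hlt : x0 < n + 1 := by omega
    rw [PySem.List.pyRange_one_cons hlt, List.foldl_cons]
    have hinner := dp_inner n benefits hlen hrows x0 hx0 (by omega) n.toNat 1 dp (by omega)
      (by omega)
      (by
        intro a b ha0 hax hb0 hbn hcase
        rcases hcase with h | h
        · exact H1 a b ha0 h hb0 hbn
        · have hb : b = 0 := by omega
          subst hb
          have hz : Pf benefits a.toNat ((0:Int).toNat) = 0 := by simp [Pf_zero_right]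
          rw [hz]
          rcases lt_or_eq_of_le hax with h' | h'
          · rw [H1 a 0 ha0 h' (by omega) (by omega)]
            exact hz
          · subst h'
            exact H2 a 0 (le_refl _))
    have H1' : ∀ a b, 0 ≤ a → a < x0+1 → 0 ≤ b → b ≤ n →
        ((PySem.List.pyRange 1 (n+1) 1).foldl
          (fun dp y => fun a b =>
            if a = x0 ∧ b = y then
              PySem.List.pyGetD (PySem.List.pyGetD benefits (x0-1) ([] : List Int)) (y-1) 0
                + dp (x0-1) y + dp x0 (y-1) - dp (x0-1) (y-1)
            else dp a b) dp) a b = Pf benefits a.toNat b.toNat := by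
      intro a b ha0 hax hb0 hbn
      rw [hinner a b]
      by_cases hc : a = x0
      · subst hc
        by_cases hb1 : 1 ≤ b
        · rw [if_pos ⟨rfl, hb1, hbn⟩]
        · have hb : b = 0 := by omega
          subst hb
          rw [if_neg (by omega), H2 a 0 (le_refl _)]
          simp [Pf_zero_right]
      · rw [if_neg (by intro hcon; exact hc hcon.1)]
        exact H1 a b ha0 (by omega) hb0 hbn
    have H2' : ∀ a b, x0+1 ≤ a →
        ((PySem.List.pyRange 1 (n+1) 1).foldl
          (fun dp y => fun a b =>
            if a = x0 ∧ b = y then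
              PySem.List.pyGetD (PySem.List.pyGetD benefits (x0-1) ([] : List Int)) (y-1) 0
                + dp (x0-1) y + dp x0 (y-1) - dp (x0-1) (y-1)
            else dp a b) dp) a b = 0 := by
      intro a b hax
      rw [hinner a b, if_neg (by intro hcon; omega)]
      exact H2 a b (by omega)
    exact ih (x0+1) _ (by omega) (by omega) H1' H2' a b ha0 han hb0 hbn

theorem answer_eq_vals (n : Int) (benefits : List (List Int)) (F : Int → Int → Int)
    (hF : ∀ a b : Int, 0 ≤ a → a ≤ n → 0 ≤ b → b ≤ n → F a b = Pf benefits a.toNat b.toNat) :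
    ((PySem.List.pyRange 0 n 1).foldl (fun ans k =>
      (PySem.List.pyRange 0 (n-k) 1).foldl (fun ans x1 =>
        (PySem.List.pyRange 0 (n-k) 1).foldl (fun ans y1 =>
          ans ++ [F (x1+k+1) (y1+k+1) - F x1 (y1+k+1) - F (x1+k+1) y1 + F x1 y1]) ans) ans)
      ([] : List Int)) = vals n benefits := by
  have inner : ∀ k x1 : Int, 0 ≤ k → k < n → 0 ≤ x1 → x1 < n - k → ∀ ans : List Int,
      (PySem.List.pyRange 0 (n-k) 1).foldl (fun ans y1 =>
        ans ++ [F (x1+k+1) (y1+k+1) - F x1 (y1+k+1) - F (x1+k+1) y1 + F x1 y1]) ans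
      = ans ++ (PySem.List.pyRange 0 (n-k) 1).map
          (fun y1 => qv benefits k.toNat x1.toNat y1.toNat) := by
    intro k x1 hk0 hkn hx0 hxn ans
    rw [PySem.List.foldl_congr_mem _ _
        (fun ans y1 => ans ++ [qv benefits k.toNat x1.toNat y1.toNat]) ans
        (by
          intro acc y1 hy1
          obtain ⟨hy0, hyn⟩ := PySem.List.mem_pyRange_one.mp hy1
          have hval : F (x1+k+1) (y1+k+1) - F x1 (y1+k+1) - F (x1+k+1) y1 + F x1 y1
              = qv benefits k.toNat x1.toNat y1.toNat := by
            rw [hF (x1+k+1) (y1+k+1) (by omega) (by omega) (by omega) (by omega),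
                hF x1 (y1+k+1) (by omega) (by omega) (by omega) (by omega),
                hF (x1+k+1) y1 (by omega) (by omega) (by omega) (by omega),
                hF x1 y1 (by omega) (by omega) (by omega) (by omega)]
            unfold qv
            rw [show (x1+k+1).toNat = x1.toNat+k.toNat+1 by omega,
                show (y1+k+1).toNat = y1.toNat+k.toNat+1 by omega]
          rw [hval])]
    rw [← flatMap_singleton_eq_map (fun (y1 : Int) => qv benefits k.toNat x1.toNat y1.toNat)]
    exact PySem.List.foldl_append_eq_flatMap _ _ ans
  have middle : ∀ k : Int, 0 ≤ k → k < n → ∀ ans : List Int,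
      (PySem.List.pyRange 0 (n-k) 1).foldl (fun ans x1 =>
        (PySem.List.pyRange 0 (n-k) 1).foldl (fun ans y1 =>
          ans ++ [F (x1+k+1) (y1+k+1) - F x1 (y1+k+1) - F (x1+k+1) y1 + F x1 y1]) ans) ans
      = ans ++ (PySem.List.pyRange 0 (n-k) 1).flatMap (fun x1 =>
          (PySem.List.pyRange 0 (n-k) 1).map
            (fun y1 => qv benefits k.toNat x1.toNat y1.toNat)) := by
    intro k hk0 hkn ans
    rw [PySem.List.foldl_congr_mem _ _
        (fun ans x1 => ans ++ (PySem.List.pyRange 0 (n-k) 1).map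
          (fun y1 => qv benefits k.toNat x1.toNat y1.toNat)) ans
        (by
          intro acc x1 hx1
          obtain ⟨hx0, hxn⟩ := PySem.List.mem_pyRange_one.mp hx1
          exact inner k x1 hk0 hkn hx0 hxn acc)]
    exact PySem.List.foldl_append_eq_flatMap _ _ ans
  rw [PySem.List.foldl_congr_mem _ _
      (fun ans k => ans ++ (PySem.List.pyRange 0 (n-k) 1).flatMap (fun x1 =>
        (PySem.List.pyRange 0 (n-k) 1).map
          (fun y1 => qv benefits k.toNat x1.toNat y1.toNat))) ([] : List Int)
      (by
        intro acc k hk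
        obtain ⟨hk0, hkn⟩ := PySem.List.mem_pyRange_one.mp hk
        exact middle k hk0 hkn acc)]
  rw [PySem.List.foldl_append_eq_flatMap (fun (k : Int) =>
        (PySem.List.pyRange 0 (n-k) 1).flatMap (fun x1 =>
          (PySem.List.pyRange 0 (n-k) 1).map
            (fun y1 => qv benefits k.toNat x1.toNat y1.toNat))) _ ([] : List Int)]
  rfl

theorem solutionA_eq (n : Int) (benefits : List (List Int))
    (hlen : n ≤ (benefits.length : Int))
    (hrows : ∀ row ∈ benefits.take n.toNat, n ≤ (row.length : Int)) :
    solution n benefits = (PySem.List.max? (vals n benefits) (fun v => v)).getD 0 := by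
  have hdp0 : ∀ a b : Int, 0 ≤ a → a ≤ n → 0 ≤ b → b ≤ n →
      ((PySem.List.pyRange 1 (n+1) 1).foldl
        (fun dp x => (PySem.List.pyRange 1 (n+1) 1).foldl
          (fun dp y => fun a b =>
            if a = x ∧ b = y then
              PySem.List.pyGetD (PySem.List.pyGetD benefits (x-1) ([] : List Int)) (y-1) 0
                + dp (x-1) y + dp x (y-1) - dp (x-1) (y-1)
            else dp a b) dp) (fun _ _ => (0:Int))) a b = Pf benefits a.toNat b.toNat := by
    intro a b ha0 han hb0 hbn
    refine dp_outer n benefits hlen hrows n.toNat 1 (fun _ _ => 0) (le_refl 1) (by omega)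
      ?_ (fun _ _ _ => rfl) a b ha0 han hb0 hbn
    intro a b ha0 hax hb0 hbn
    rw [show a.toNat = 0 by omega]
    simp [Pf_zero_left]
  simp only [solution]
  rw [answer_eq_vals n benefits _ hdp0]

theorem cols0_eq (n : Int) (benefits : List (List Int)) :
    List.replicate n.toNat (0:Int) = colRow benefits n 0 := by
  unfold colRow Cc
  rw [show (fun (j : Int) => ∑ t ∈ Finset.range 0, bN benefits t j.toNat)
        = (fun (_ : Int) => (0:Int)) by funext j; simp,
      List.map_const', PySem.List.length_pyRange_one]
  norm_num

theorem colRow_step (n : Int) (benefits : List (List Int))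
    (hlen : n ≤ (benefits.length : Int))
    (hrows : ∀ row ∈ benefits.take n.toNat, n ≤ (row.length : Int))
    (i : Nat) (hi : i < n.toNat) (hib : i < benefits.length) :
    (PySem.List.pyRange 0 n 1).map (fun j =>
      PySem.List.pyGetD (colRow benefits n i) j 0 + PySem.List.pyGetD benefits[i] j 0)
    = colRow benefits n (i+1) := by
  apply List.map_congr_left
  intro j hj
  obtain ⟨hj0, hjn⟩ := PySem.List.mem_pyRange_one.mp hj
  rw [show colRow benefits n i
      = (PySem.List.pyRange 0 n 1).map (fun j => Cc benefits i j.toNat) from rfl,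
    PySem.List.pyGetD_map_pyRange_of_nonneg _ n j 0 hj0 hjn]
  have hmem : benefits[i] ∈ benefits.take n.toNat := by
    have hlt : i < (benefits.take n.toNat).length := by
      simp only [List.length_take]; omega
    have hg : (benefits.take n.toNat)[i] = benefits[i] := List.getElem_take
    rw [← hg]; exact List.getElem_mem hlt
  have hrl := hrows _ hmem
  rw [PySem.List.pyGetD_eq_getElem _ 0 hj0 (by omega)]
  show Cc benefits i j.toNat + benefits[i][j.toNat] = Cc benefits (i+1) j.toNat
  unfold Cc
  rw [Finset.sum_range_succ]
  congr 1
  unfold bN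
  rw [List.getD_eq_getElem benefits ([] : List Int) hib,
      List.getD_eq_getElem _ 0 (show j.toNat < benefits[i].length by omega)]

theorem colsum_fold_aux (n : Int) (benefits : List (List Int))
    (hlen : n ≤ (benefits.length : Int))
    (hrows : ∀ row ∈ benefits.take n.toNat, n ≤ (row.length : Int)) :
    ∀ (fuel i : Nat) (acc : List (List Int)), i + fuel = n.toNat →
      ((benefits.drop i).take fuel).foldl (colsumStep n) (colRow benefits n i, acc)
        = (colRow benefits n n.toNat, acc ++ (List.range' (i+1) fuel).map (colRow benefits n)) := by
  intro fuel
  induction fuel with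
  | zero =>
    intro i acc hfi
    simp only [List.take_zero, List.foldl_nil, List.range', List.map_nil, List.append_nil]
    rw [show i = n.toNat by omega]
  | succ fuel ih =>
    intro i acc hfi
    have hib : i < benefits.length := by omega
    rw [List.drop_eq_getElem_cons hib, List.take_succ_cons, List.foldl_cons]
    have hstep : colsumStep n (colRow benefits n i, acc) benefits[i]
        = (colRow benefits n (i+1), acc ++ [colRow benefits n (i+1)]) := by
      unfold colsumStep
      rw [colRow_step n benefits hlen hrows i (by omega) hib]
    rw [hstep, ih (i+1) _ (by omega), List.range'_succ]
    simp

theorem colsum_eq (n : Int) (benefits : List (List Int)) (hn : 0 ≤ n)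
    (hlen : n ≤ (benefits.length : Int))
    (hrows : ∀ row ∈ benefits.take n.toNat, n ≤ (row.length : Int)) :
    (PySem.List.slice benefits none (some n)).foldl (colsumStep n)
        (List.replicate n.toNat 0, [List.replicate n.toNat 0])
      = (colRow benefits n n.toNat, (List.range (n.toNat+1)).map (colRow benefits n)) := by
  rw [PySem.List.slice_to benefits hn, cols0_eq n benefits,
      show benefits.take n.toNat = (benefits.drop 0).take n.toNat by rw [List.drop_zero],
      colsum_fold_aux n benefits hlen hrows n.toNat 0 _ (by omega)]
  congr 1
  rw [List.range_eq_range', List.range'_succ]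
  simp

theorem colsum_get (n : Int) (benefits : List (List Int)) (r : Int)
    (h0 : 0 ≤ r) (h1 : r ≤ n) :
    PySem.List.pyGetD ((List.range (n.toNat+1)).map (colRow benefits n)) r ([] : List Int)
      = colRow benefits n r.toNat := by
  rw [PySem.List.pyGetD_eq_getElem _ _ h0 (by simp [List.length_map, List.length_range]; omega)]
  simp [List.getElem_map, List.getElem_range]

theorem total_eq (n : Int) (benefits : List (List Int)) (k r : Int)
    (hk0 : 0 ≤ k) (hkn : k < n) :
    (PySem.List.slice ((PySem.List.pyRange 0 n 1).map (fun j =>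
        stripvD benefits r.toNat k.toNat j.toNat)) none (some (k+1))).sum
      = Wv benefits r.toNat k.toNat 0 := by
  rw [PySem.List.slice_to _ (by omega : (0:Int) ≤ k+1), PySem.List.pyRange_zero, List.map_map,
      ← List.map_take, List.take_range,
      show min (k+1).toNat n.toNat = k.toNat + 1 by omega]
  have he : ((fun (j : Int) => stripvD benefits r.toNat k.toNat j.toNat) ∘ fun (m : Nat) => (m:Int))
      = fun (m : Nat) => stripvD benefits r.toNat k.toNat m := by
    funext m; simp [Function.comp, Int.toNat_natCast]
  rw [he, sum_map_range]
  unfold Wv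
  exact Finset.sum_congr rfl (fun j _ => by rw [Nat.zero_add])

theorem inner_fold_B (n : Int) (benefits : List (List Int)) (k r : Int)
    (hk0 : 0 ≤ k) (hkn : k < n) (hr0 : 0 ≤ r) (hrn : r < n - k) :
    ∀ (fuel : Nat) (c0 : Int) (best : Option Int), 1 ≤ c0 → c0 + (fuel : Int) = n - k →
      ((PySem.List.pyRange c0 (n-k) 1).foldl (fun (st : Int × Option Int) c =>
          let t := st.1 + (PySem.List.pyGetD ((PySem.List.pyRange 0 n 1).map (fun j => stripvD benefits r.toNat k.toNat j.toNat)) (c+k) 0 - PySem.List.pyGetD ((PySem.List.pyRange 0 n 1).map (fun j => stripvD benefits r.toNat k.toNat j.toNat)) (c-1) 0);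
          (t, some (match st.2 with | none => t | some b => max b t)))
        (Wv benefits r.toNat k.toNat (c0-1).toNat, best)).2
      = ((PySem.List.pyRange c0 (n-k) 1).map
          (fun c => Wv benefits r.toNat k.toNat c.toNat)).foldl mstep best := by
  intro fuel
  induction fuel with
  | zero =>
    intro c0 best hc0 hcf
    rw [PySem.List.pyRange_one_eq_nil (show n-k ≤ c0 by omega)]
    rfl
  | succ fuel ih =>
    intro c0 best hc0 hcf
    rw [PySem.List.pyRange_one_cons (show c0 < n-k by omega), List.foldl_cons, List.map_cons,
        List.foldl_cons]
    have hget1 : PySem.List.pyGetD ((PySem.List.pyRange 0 n 1).map (fun j =>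
        stripvD benefits r.toNat k.toNat j.toNat)) (c0+k) 0
        = stripvD benefits r.toNat k.toNat (c0+k).toNat :=
      PySem.List.pyGetD_map_pyRange_of_nonneg _ n (c0+k) 0 (by omega) (by omega)
    have hget2 : PySem.List.pyGetD ((PySem.List.pyRange 0 n 1).map (fun j =>
        stripvD benefits r.toNat k.toNat j.toNat)) (c0-1) 0
        = stripvD benefits r.toNat k.toNat (c0-1).toNat :=
      PySem.List.pyGetD_map_pyRange_of_nonneg _ n (c0-1) 0 (by omega) (by omega)
    have ht : Wv benefits r.toNat k.toNat (c0-1).toNat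
        + (stripvD benefits r.toNat k.toNat (c0+k).toNat
            - stripvD benefits r.toNat k.toNat (c0-1).toNat)
        = Wv benefits r.toNat k.toNat c0.toNat := by
      have e1 : c0.toNat = (c0-1).toNat + 1 := by omega
      have e2 : (c0+k).toNat = (c0-1).toNat + 1 + k.toNat := by omega
      rw [e1, e2, Wv_succ]
      ring
    simp only [hget1, hget2]
    rw [ht]
    have := ih (c0+1) (mstep best (Wv benefits r.toNat k.toNat c0.toNat)) (by omega) (by omega)
    rw [show (c0+1-1).toNat = c0.toNat by omega] at this
    exact this

theorem slideRow_eq (n : Int) (benefits : List (List Int)) (k r : Int)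
    (hk0 : 0 ≤ k) (hkn : k < n) (hr0 : 0 ≤ r) (hrn : r < n - k) (best : Option Int) :
    slideRow n ((List.range (n.toNat+1)).map (colRow benefits n)) k r best
      = ((PySem.List.pyRange 0 (n-k) 1).map
          (fun c => Wv benefits r.toNat k.toNat c.toNat)).foldl mstep best := by
  simp only [slideRow]
  rw [colsum_get n benefits r hr0 (by omega),
      colsum_get n benefits (r+k+1) (by omega) (by omega)]
  have hstrip : (PySem.List.pyRange 0 n 1).map (fun j =>
      PySem.List.pyGetD (colRow benefits n (r+k+1).toNat) j 0
        - PySem.List.pyGetD (colRow benefits n r.toNat) j 0)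
      = (PySem.List.pyRange 0 n 1).map (fun j =>
          stripvD benefits r.toNat k.toNat j.toNat) := by
    apply List.map_congr_left
    intro j hj
    obtain ⟨hj0, hjn⟩ := PySem.List.mem_pyRange_one.mp hj
    rw [show colRow benefits n (r+k+1).toNat
        = (PySem.List.pyRange 0 n 1).map (fun j => Cc benefits (r+k+1).toNat j.toNat) from rfl,
      show colRow benefits n r.toNat
        = (PySem.List.pyRange 0 n 1).map (fun j => Cc benefits r.toNat j.toNat) from rfl,
      PySem.List.pyGetD_map_pyRange_of_nonneg _ n j 0 hj0 hjn,
      PySem.List.pyGetD_map_pyRange_of_nonneg _ n j 0 hj0 hjn]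
    unfold stripvD
    rw [show (r+k+1).toNat = r.toNat + k.toNat + 1 by omega]
  rw [hstrip, total_eq n benefits k r hk0 hkn]
  have hsplit : PySem.List.pyRange 0 (n-k) 1 = 0 :: PySem.List.pyRange 1 (n-k) 1 := by
    rw [PySem.List.pyRange_one_cons (show (0:Int) < n-k by omega)]
    norm_num
  rw [hsplit, List.map_cons, List.foldl_cons]
  have := inner_fold_B n benefits k r hk0 hkn hr0 hrn (n-k-1).toNat 1
    (mstep best (Wv benefits r.toNat k.toNat (0:Int).toNat)) (le_refl 1) (by omega)
  rw [show ((1:Int)-1).toNat = (0:Int).toNat by omega] at this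
  exact this

set_option maxHeartbeats 1000000 in
theorem alt_eq (n : Int) (benefits : List (List Int)) (hn : 1 ≤ n)
    (hlen : n ≤ (benefits.length : Int))
    (hrows : ∀ row ∈ benefits.take n.toNat, n ≤ (row.length : Int)) :
    solution_alt n benefits = ((vals n benefits).foldl mstep none).getD 0 := by
  have hcs2 : ((PySem.List.slice benefits none (some n)).foldl (colsumStep n)
      (List.replicate n.toNat 0, [List.replicate n.toNat 0])).2
      = (List.range (n.toNat+1)).map (colRow benefits n) := by
    rw [colsum_eq n benefits (by omega) hlen hrows]
  have hk : ∀ colsum, colsum = (List.range (n.toNat+1)).map (colRow benefits n) →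
      (PySem.List.pyRange 0 n 1).foldl (fun best k =>
        (PySem.List.pyRange 0 (n-k) 1).foldl (fun best r =>
          slideRow n colsum k r best) best) none
      = (vals n benefits).foldl mstep none := by
    intro colsum hcol
    subst hcol
    have hlevelk : ∀ (best : Option Int), ∀ k ∈ PySem.List.pyRange 0 n 1,
        (PySem.List.pyRange 0 (n-k) 1).foldl (fun best r =>
          slideRow n ((List.range (n.toNat+1)).map (colRow benefits n)) k r best) best
        = ((PySem.List.pyRange 0 (n-k) 1).flatMap (fun r =>
            (PySem.List.pyRange 0 (n-k) 1).map
              (fun c => Wv benefits r.toNat k.toNat c.toNat))).foldl mstep best := by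
      intro best k hkmem
      obtain ⟨hk0, hkn⟩ := PySem.List.mem_pyRange_one.mp hkmem
      exact foldl_via _ _ mstep _
        (fun acc r hr => by
          obtain ⟨hr0, hrn⟩ := PySem.List.mem_pyRange_one.mp hr
          exact slideRow_eq n benefits k r hk0 hkn hr0 hrn acc) best
    have hstep1 : (PySem.List.pyRange 0 n 1).foldl (fun best k =>
        (PySem.List.pyRange 0 (n-k) 1).foldl (fun best r =>
          slideRow n ((List.range (n.toNat+1)).map (colRow benefits n)) k r best) best) none
        = ((PySem.List.pyRange 0 n 1).flatMap (fun k =>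
            (PySem.List.pyRange 0 (n-k) 1).flatMap (fun r =>
              (PySem.List.pyRange 0 (n-k) 1).map
                (fun c => Wv benefits r.toNat k.toNat c.toNat)))).foldl mstep none :=
      foldl_via _ _ mstep _ (fun acc k hk => hlevelk acc k hk) none
    have hstep2 : (PySem.List.pyRange 0 n 1).flatMap (fun k =>
        (PySem.List.pyRange 0 (n-k) 1).flatMap (fun r =>
          (PySem.List.pyRange 0 (n-k) 1).map
            (fun c => Wv benefits r.toNat k.toNat c.toNat))) = vals n benefits := by
      unfold vals
      apply List.flatMap_congr
      intro k _
      apply List.flatMap_congr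
      intro r _
      apply List.map_congr_left
      intro c _
      exact Wv_eq_qv benefits r.toNat k.toNat c.toNat
    rw [hstep1, hstep2]
  simp only [solution_alt]
  rw [hcs2, hk _ rfl]

-- ===== VERDICT (by name: the statement is the Claim_ definition above) =====
theorem solution_spec : Claim_equal_solution := by
  intro n benefits hDom hPre
  unfold Pre_solution at hPre
  obtain ⟨hn, hlen, hrows⟩ := hPre
  unfold Spec_solution
  rw [solutionA_eq n benefits hlen hrows, alt_eq n benefits hn hlen hrows,
      foldl_mstep_max? (vals n benefits)]
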